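-- pv_equiv track=rewrite | github.com/degenai/Dataset9 | scraper/exploration_probe.py | generate_round_numbers
-- ===== SOURCE A (Python) =====
-- from typing import Dict, List, Optional, Set
--
-- def generate_round_numbers(min_val: int, max_val: int) -> List[int]:
--     """Generate round numbers (multiples of 10k, 100k, 1M, etc.)."""
--     result = []
--     for mult in [10_000, 25_000, 50_000, 100_000, 250_000, 500_000,
--                  1_000_000, 2_500_000, 5_000_000, 10_000_000, 25_000_000,
--                  50_000_000, 100_000_000, 250_000_000, 500_000_000]:
--         if min_val <= mult <= max_val:
--             result.append(mult)
--     return result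
-- ===== SOURCE B (Python) =====
-- _MULTS = [10_000, 25_000, 50_000, 100_000, 250_000, 500_000,
--           1_000_000, 2_500_000, 5_000_000, 10_000_000, 25_000_000,
--           50_000_000, 100_000_000, 250_000_000, 500_000_000]
--
--
-- def _bisect(mults, pred):
--     """First index i with pred(mults[i]) false; pred must be true on a prefix."""
--     lo, hi = 0, len(mults)
--     while lo < hi:
--         mid = (lo + hi) // 2
--         if pred(mults[mid]):
--             lo = mid + 1
--         else:
--             hi = mid
--     return lo
--
--
-- def generate_round_numbers(min_val: int, max_val: int):
--     """Generate round numbers (multiples of 10k, 100k, 1M, etc.).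
--
--     The constant list is sorted, so the answer is the contiguous slice
--     between two binary-searched boundaries: the first multiplier >= min_val
--     and the first one > max_val."""
--     lo = _bisect(_MULTS, lambda m: m < min_val)
--     hi = _bisect(_MULTS, lambda m: m <= max_val)
--     return _MULTS[lo:hi]
-- ===== Notes on version B (the rewrite author's own statement) =====
-- stated objective: alternative
-- what changed: Instead of linearly testing every constant against the range and appending matches, B binary-searches the sorted constant list for the two boundary indices (first multiplier >= min_val, first one > max_val) and returns that contiguous slice.
import Mathlib
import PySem

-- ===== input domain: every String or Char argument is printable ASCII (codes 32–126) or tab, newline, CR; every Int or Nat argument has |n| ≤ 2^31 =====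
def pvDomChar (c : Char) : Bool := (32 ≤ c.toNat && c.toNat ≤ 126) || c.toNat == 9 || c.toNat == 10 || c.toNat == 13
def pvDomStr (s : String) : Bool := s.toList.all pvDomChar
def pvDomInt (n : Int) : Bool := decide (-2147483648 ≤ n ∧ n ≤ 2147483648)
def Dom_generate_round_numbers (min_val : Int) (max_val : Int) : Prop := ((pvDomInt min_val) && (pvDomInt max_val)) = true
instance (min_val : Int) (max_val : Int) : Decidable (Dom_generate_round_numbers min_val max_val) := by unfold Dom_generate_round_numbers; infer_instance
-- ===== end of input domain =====

-- B replaces A's linear per-element range filter with binary search for the two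
-- boundary indices on the sorted constant list, then one slice (objective: alternative).

-- ===== PORT A =====
-- the constant list of multipliers (shared literal data, not logic)
def pvMults : List Int :=
  [10000, 25000, 50000, 100000, 250000, 500000,
   1000000, 2500000, 5000000, 10000000, 25000000,
   50000000, 100000000, 250000000, 500000000]

def generate_round_numbers (min_val : Int) (max_val : Int) : List Int :=
  pvMults.foldl
    (fun result mult => if min_val ≤ mult ∧ mult ≤ max_val then result ++ [mult] else result)
    []

-- ===== PORT B =====
-- '_bisect(mults, pred)': binary search for the first index whose element fails pred
-- (mults[mid] is always in range while lo < hi ≤ len, so getD's default is never used)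
def pvBisect (l : List Int) (p : Int → Bool) (lo hi : Nat) : Nat :=
  if _h : lo < hi then
    let mid := (lo + hi) / 2
    if p (l.getD mid 0) then pvBisect l p (mid + 1) hi else pvBisect l p lo mid
  else lo
termination_by hi - lo

def generate_round_numbers_alt (min_val : Int) (max_val : Int) : List Int :=
  let lo := pvBisect pvMults (fun m => decide (m < min_val)) 0 pvMults.length
  let hi := pvBisect pvMults (fun m => decide (m ≤ max_val)) 0 pvMults.length
  PySem.List.slice pvMults (some (lo : Int)) (some (hi : Int))

-- ===== PRECONDITION & SPEC =====
def Spec_generate_round_numbers (min_val : Int) (max_val : Int) (out : List Int) : Prop := out = generate_round_numbers_alt min_val max_val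
instance (min_val : Int) (max_val : Int) (out : List Int) : Decidable (Spec_generate_round_numbers min_val max_val out) := by unfold Spec_generate_round_numbers; infer_instance

-- ===== CLAIM (what is proved, stated in full; the proofs are below) =====
def Claim_equal_generate_round_numbers : Prop := ∀ (min_val : Int) (max_val : Int), Dom_generate_round_numbers min_val max_val → Spec_generate_round_numbers min_val max_val (generate_round_numbers min_val max_val)

-- ===== LEMMAS AND PROOFS =====

-- binary search finds the unique boundary b when p holds exactly below b
theorem pvBisect_eq (l : List Int) (p : Int → Bool) (b : Nat)
    (hiff : ∀ i (h : i < l.length), p l[i] = true ↔ i < b) :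
    ∀ lo hi, lo ≤ b → b ≤ hi → hi ≤ l.length → pvBisect l p lo hi = b := by
  intro lo hi
  fun_induction pvBisect l p lo hi with
  | case1 lo hi h mid hp ih =>
      intro h1 h2 h3
      have hmid : mid < l.length := by omega
      rw [List.getD_eq_getElem l 0 hmid] at hp
      have := (hiff mid hmid).mp hp
      exact ih (by omega) h2 h3
  | case2 lo hi h mid hp ih =>
      intro h1 h2 h3
      have hmid : mid < l.length := by omega
      rw [List.getD_eq_getElem l 0 hmid] at hp
      have : ¬ mid < b := fun hc => hp ((hiff mid hmid).mpr hc)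
      exact ih h1 (by omega) (by omega)
  | case3 lo hi h =>
      intro h1 h2 h3; omega

theorem takeWhile_len_le (p : Int → Bool) (l : List Int) : (l.takeWhile p).length ≤ l.length :=
  (List.takeWhile_sublist p).length_le

-- within the takeWhile prefix, elements agree with the original list
theorem getElem_takeWhile' (p : Int → Bool) (l : List Int) (i : Nat)
    (h : i < (l.takeWhile p).length) :
    (l.takeWhile p)[i] = l[i]'(Nat.lt_of_lt_of_le h (takeWhile_len_le p l)) := by
  induction l generalizing i with
  | nil => simp at h
  | cons a t ih =>
      by_cases hp : p a = true
      · cases i with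
        | zero => simp [List.takeWhile_cons, hp]
        | succ j =>
            have h' : j < (t.takeWhile p).length := by
              simpa [List.takeWhile_cons, hp] using h
            simpa [List.takeWhile_cons, hp] using ih j h'
      · simp [List.takeWhile_cons, hp] at h

-- the element just past the takeWhile prefix fails p
theorem takeWhile_boundary_false (p : Int → Bool) (l : List Int)
    (h : (l.takeWhile p).length < l.length) :
    p (l[(l.takeWhile p).length]'h) = false := by
  induction l with
  | nil => simp at h
  | cons a t ih =>
      by_cases hp : p a = true
      · have h' : (t.takeWhile p).length < t.length := by
          simpa [List.takeWhile_cons, hp] using h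
        have := ih h'
        simpa [List.takeWhile_cons, hp] using this
      · simpa [List.takeWhile_cons, hp] using hp

-- on a sorted list with a downward-closed predicate, p holds exactly on the takeWhile prefix
theorem boundary_iff (p : Int → Bool) (l : List Int)
    (hs : l.Pairwise (· ≤ ·)) (hdc : ∀ a b : Int, a ≤ b → p b = true → p a = true) :
    ∀ i (h : i < l.length), p l[i] = true ↔ i < (l.takeWhile p).length := by
  intro i h
  constructor
  · intro hp
    by_contra hge
    rw [Nat.not_lt] at hge
    have hb : (l.takeWhile p).length < l.length := by omega
    have hfalse := takeWhile_boundary_false p l hb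
    rcases Nat.lt_or_ge (l.takeWhile p).length i with hlt | hle
    · have hle' : l[(l.takeWhile p).length] ≤ l[i] :=
        (List.pairwise_iff_getElem.mp hs) _ _ hb h hlt
      have := hdc _ _ hle' hp
      rw [hfalse] at this; exact Bool.false_ne_true this
    · have : i = (l.takeWhile p).length := by omega
      subst this
      rw [hfalse] at hp; exact Bool.false_ne_true hp
  · intro hlt
    have : l[i] ∈ l.takeWhile p := by
      rw [← getElem_takeWhile' p l i hlt]
      exact List.getElem_mem _
    exact List.mem_takeWhile_imp this

-- taking the matching prefix commutes with dropping, for downward-closed p on a sorted list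
theorem takeWhile_drop_comm (p : Int → Bool) (l : List Int)
    (hs : l.Pairwise (· ≤ ·)) (hdc : ∀ a b : Int, a ≤ b → p b = true → p a = true) :
    ∀ n, (l.drop n).takeWhile p = (l.takeWhile p).drop n := by
  induction l with
  | nil => intro n; simp
  | cons a t ih =>
      intro n
      rcases List.pairwise_cons.mp hs with ⟨hall, ht⟩
      cases n with
      | zero => simp
      | succ m =>
          by_cases hp : p a = true
          · simpa [List.takeWhile_cons, hp] using ih ht m
          · have hnil : (t.drop m).takeWhile p = [] := by
              apply List.takeWhile_eq_nil_iff.mpr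
              intro h0
              have hm : m < t.length := by
                have := (t.drop m).length_pos_iff.mpr (by
                  intro hc; rw [hc] at h0; simp at h0)
                simp at this; omega
              have hx : (t.drop m)[0] = t[m] := by simp
              intro hpx
              have hmem : t[m] ∈ t := List.getElem_mem _
              have := hdc a t[m] (hall _ hmem) (by rw [← hx]; exact hpx)
              exact hp this
            simp [List.takeWhile_cons, hp, hnil]

-- drop (length of takeWhile) = dropWhile ; take (length of takeWhile) = takeWhile
theorem drop_length_takeWhile (p : Int → Bool) (l : List Int) :
    l.drop (l.takeWhile p).length = l.dropWhile p := by
  induction l with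
  | nil => simp
  | cons a t ih =>
      by_cases hp : p a = true
      · simp [List.dropWhile_cons, hp, ih]
      · simp [List.dropWhile_cons, hp]

theorem take_length_takeWhile (p : Int → Bool) (l : List Int) :
    l.take (l.takeWhile p).length = l.takeWhile p := by
  induction l with
  | nil => simp
  | cons a t ih =>
      by_cases hp : p a = true
      · simp [hp, ih]
      · simp [hp]

-- on a sorted list whose elements are all ≥ min, the range filter is a takeWhile
theorem filter_eq_takeWhile (minv maxv : Int) (l : List Int)
    (hs : l.Pairwise (· ≤ ·)) (hge : ∀ m ∈ l, minv ≤ m) :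
    l.filter (fun m => decide (minv ≤ m) && decide (m ≤ maxv)) =
      l.takeWhile (fun m => decide (m ≤ maxv)) := by
  induction l with
  | nil => simp
  | cons a t ih =>
      rcases List.pairwise_cons.mp hs with ⟨hall, ht⟩
      have ha : minv ≤ a := hge a (by simp)
      by_cases hle : a ≤ maxv
      · have hrec := ih ht (fun m hm => hge m (by simp [hm]))
        simp only [List.filter_cons, List.takeWhile_cons]
        rw [if_pos (by simp [ha, hle]), if_pos (by simp [hle]), hrec]
      · have hnil : t.filter (fun m => decide (minv ≤ m) && decide (m ≤ maxv)) = [] := by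
          apply List.filter_eq_nil_iff.mpr
          intro m hm
          have := hall m hm
          simp
          intro _
          omega
        simp only [List.filter_cons, List.takeWhile_cons]
        rw [if_neg (by simp [hle]), if_neg (by simp [hle]), hnil]

-- on a sorted list, the range filter is the contiguous segment
theorem filter_eq_segment (minv maxv : Int) (l : List Int) (hs : l.Pairwise (· ≤ ·)) :
    l.filter (fun m => decide (minv ≤ m) && decide (m ≤ maxv)) =
      (l.dropWhile (fun m => decide (m < minv))).takeWhile (fun m => decide (m ≤ maxv)) := by
  induction l with
  | nil => simp
  | cons a t ih =>
      rcases List.pairwise_cons.mp hs with ⟨hall, ht⟩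
      by_cases hlt : a < minv
      · rw [List.dropWhile_cons_of_pos (by simp [hlt]), List.filter_cons_of_neg (by simp; intro h; omega)]
        exact ih ht
      · rw [List.dropWhile_cons_of_neg (by simp; omega)]
        apply filter_eq_takeWhile minv maxv (a :: t) hs
        intro m hm
        rcases List.mem_cons.mp hm with h | h
        · omega
        · have := hall m h; omega

theorem pvMults_sorted : pvMults.Pairwise (· ≤ ·) := by decide

theorem generate_round_numbers_spec : Claim_equal_generate_round_numbers := by
  intro minv maxv _
  unfold Spec_generate_round_numbers generate_round_numbers generate_round_numbers_alt
  have hdc1 : ∀ a b : Int, a ≤ b → (fun m => decide (m < minv)) b = true →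
      (fun m => decide (m < minv)) a = true := by
    intro a b hab h; simp at h ⊢; omega
  have hdc2 : ∀ a b : Int, a ≤ b → (fun m => decide (m ≤ maxv)) b = true →
      (fun m => decide (m ≤ maxv)) a = true := by
    intro a b hab h; simp at h ⊢; omega
  have hb1 := pvBisect_eq pvMults (fun m => decide (m < minv))
    ((pvMults.takeWhile (fun m => decide (m < minv))).length)
    (boundary_iff _ pvMults pvMults_sorted hdc1) 0 pvMults.length
    (Nat.zero_le _) (takeWhile_len_le _ _) (Nat.le_refl _)
  have hb2 := pvBisect_eq pvMults (fun m => decide (m ≤ maxv))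
    ((pvMults.takeWhile (fun m => decide (m ≤ maxv))).length)
    (boundary_iff _ pvMults pvMults_sorted hdc2) 0 pvMults.length
    (Nat.zero_le _) (takeWhile_len_le _ _) (Nat.le_refl _)
  simp only [hb1, hb2]
  rw [PySem.List.foldl_append_ite_eq_filter, List.nil_append]
  rw [PySem.List.slice_natCast]
  have hseg := filter_eq_segment minv maxv pvMults pvMults_sorted
  simp only [Bool.decide_and] at hseg ⊢
  rw [hseg, ← drop_length_takeWhile (fun m => decide (m < minv)),
      takeWhile_drop_comm (fun m => decide (m ≤ maxv)) pvMults pvMults_sorted hdc2,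
      ← take_length_takeWhile (fun m => decide (m ≤ maxv)), List.drop_take]
  simp [Nat.min_eq_left (takeWhile_len_le _ _)]
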